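-- pv_equiv track=rewrite | github.com/middleworldfarms/admin-middleworldfarms | ai_service/app/services/openfarm_sync.py | get_biodynamic_category
-- ===== SOURCE A (Python) =====
-- from typing import Dict, List, Optional
--
-- def get_biodynamic_category(attributes: Dict) -> str:
--     """Classify plant for biodynamic calendar"""
--
--     name = attributes.get("name", "").lower()
--
--     # Root day plants
--     if any(word in name for word in ["carrot", "beet", "radish", "turnip", "potato", "onion"]):
--         return "root_day"
--
--     # Leaf day plants
--     if any(word in name for word in ["lettuce", "spinach", "kale", "chard", "cabbage", "herb"]):
--         return "leaf_day"
--
--     # Flower day plants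
--     if any(word in name for word in ["broccoli", "cauliflower", "flower", "artichoke"]):
--         return "flower_day"
--
--     # Fruit day plants
--     if any(word in name for word in ["tomato", "pepper", "cucumber", "squash", "bean", "pea"]):
--         return "fruit_day"
--
--     return "leaf_day"  # Default
-- ===== SOURCE B (Python) =====
-- # Text-driven multi-pattern scan: slide over the name once, hash-look-up each
-- # candidate substring in a keyword->rank dict, and keep the minimum category rank.
-- _KEYWORDS = {
--     "carrot": 0, "beet": 0, "radish": 0, "turnip": 0, "potato": 0, "onion": 0,
--     "lettuce": 1, "spinach": 1, "kale": 1, "chard": 1, "cabbage": 1, "herb": 1,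
--     "broccoli": 2, "cauliflower": 2, "flower": 2, "artichoke": 2,
--     "tomato": 3, "pepper": 3, "cucumber": 3, "squash": 3, "bean": 3, "pea": 3,
-- }
-- _CATEGORIES = ["root_day", "leaf_day", "flower_day", "fruit_day"]
-- _LENGTHS = [3, 4, 5, 6, 7, 8, 9, 11]  # the distinct keyword lengths
--
-- def get_biodynamic_category(attributes):
--     name = attributes.get("name", "").lower()
--     best = None
--     for i in range(len(name)):
--         for length in _LENGTHS:
--             rank = _KEYWORDS.get(name[i:i + length])
--             if rank is not None and (best is None or rank < best):
--                 best = rank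
--     return "leaf_day" if best is None else _CATEGORIES[best]
-- ===== Notes on version B (the rewrite author's own statement) =====
-- stated objective: alternative
-- what changed: Replaces A's four keyword-driven any()-substring scans with a text-driven multi-pattern scan: one pass over the name's positions, hash-looking up each candidate substring in a keyword-to-rank dict and keeping the minimum category rank.
import Mathlib
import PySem

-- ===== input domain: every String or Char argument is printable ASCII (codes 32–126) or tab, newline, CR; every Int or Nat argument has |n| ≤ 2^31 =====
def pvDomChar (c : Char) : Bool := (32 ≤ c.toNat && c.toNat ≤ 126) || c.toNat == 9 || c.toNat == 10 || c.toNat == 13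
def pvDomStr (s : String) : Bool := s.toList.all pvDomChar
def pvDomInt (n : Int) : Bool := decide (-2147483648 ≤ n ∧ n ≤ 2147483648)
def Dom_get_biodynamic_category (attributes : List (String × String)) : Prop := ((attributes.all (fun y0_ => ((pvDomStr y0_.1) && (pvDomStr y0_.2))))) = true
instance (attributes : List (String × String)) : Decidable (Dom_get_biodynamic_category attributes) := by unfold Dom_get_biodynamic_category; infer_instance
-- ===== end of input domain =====

-- B replaces A's four keyword-driven any()-scans by a text-driven multi-pattern scan:
-- one pass over the name's positions, hash lookup of each candidate substring in a
-- keyword→rank dict, keeping the minimum category rank (alternative algorithm).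

-- ===== PORT A =====
def get_biodynamic_category (attributes : List (String × String)) : String :=
  let name := PySem.Str.lower ((PySem.Dict.mk attributes).getD "name" "")
  if (["carrot", "beet", "radish", "turnip", "potato", "onion"].any
        (fun word => PySem.Str.isIn word name)) then "root_day"
  else if (["lettuce", "spinach", "kale", "chard", "cabbage", "herb"].any
        (fun word => PySem.Str.isIn word name)) then "leaf_day"
  else if (["broccoli", "cauliflower", "flower", "artichoke"].any
        (fun word => PySem.Str.isIn word name)) then "flower_day"
  else if (["tomato", "pepper", "cucumber", "squash", "bean", "pea"].any
        (fun word => PySem.Str.isIn word name)) then "fruit_day"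
  else "leaf_day"

-- ===== PORT B =====
-- Source B's _KEYWORDS dict literal (keyword → category rank)
def pvPairs : List (String × Int) :=
  [("carrot", 0), ("beet", 0), ("radish", 0), ("turnip", 0), ("potato", 0), ("onion", 0),
   ("lettuce", 1), ("spinach", 1), ("kale", 1), ("chard", 1), ("cabbage", 1), ("herb", 1),
   ("broccoli", 2), ("cauliflower", 2), ("flower", 2), ("artichoke", 2),
   ("tomato", 3), ("pepper", 3), ("cucumber", 3), ("squash", 3), ("bean", 3), ("pea", 3)]

def pvKeywords : PySem.Dict String Int := PySem.Dict.ofList pvPairs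

def pvCategories : List String := ["root_day", "leaf_day", "flower_day", "fruit_day"]

def pvLengths : List Int := [3, 4, 5, 6, 7, 8, 9, 11]

def get_biodynamic_category_alt (attributes : List (String × String)) : String :=
  let name := PySem.Str.lower ((PySem.Dict.mk attributes).getD "name" "")
  let best : Option Int :=
    (PySem.List.pyRange 0 (PySem.Str.len name) 1).foldl
      (fun best i => pvLengths.foldl
        (fun best length =>
          match pvKeywords.get? (PySem.Str.slice name (some i) (some (i + length))) with
          | some rank => if best.elim true (fun b => rank < b) then some rank else best
          | none => best) best) none
  match best with
  | none => "leaf_day"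
  | some r => ((PySem.List.pyGet? pvCategories r).getD "leaf_day")  -- _CATEGORIES[best]; r ∈ {0,1,2,3} always, the getD only totalises the indexing

-- ===== PRECONDITION & SPEC =====
def Spec_get_biodynamic_category (attributes : List (String × String)) (out : String) : Prop := out = get_biodynamic_category_alt attributes
instance (attributes : List (String × String)) (out : String) : Decidable (Spec_get_biodynamic_category attributes out) := by unfold Spec_get_biodynamic_category; infer_instance

-- ===== CLAIM (what is proved, stated in full; the proofs are below) =====
def Claim_equal_get_biodynamic_category : Prop := ∀ (attributes : List (String × String)), Dom_get_biodynamic_category attributes → Spec_get_biodynamic_category attributes (get_biodynamic_category attributes)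

-- ===== LEMMAS AND PROOFS =====

-- the min-accumulator step of B's loop
def pvMinStep (b : Option Int) (r : Int) : Option Int :=
  if b.elim true (fun x => r < x) then some r else b

theorem pvMinStep_some (b r : Int) : pvMinStep (some b) r = some (min b r) := by
  simp only [pvMinStep, Option.elim]
  by_cases h : r < b
  · simp [h, min_eq_right (le_of_lt h)]
  · simp [h, min_eq_left (le_of_not_gt h)]

theorem pvFoldl_minStep_some (l : List Int) (b : Int) :
    l.foldl pvMinStep (some b) = some (l.foldl min b) := by
  induction l generalizing b with
  | nil => rfl
  | cons x t ih => simp only [List.foldl_cons, pvMinStep_some, ih]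

theorem pvFoldl_min_elim (t : List Int) (x : Int) :
    t.foldl min x = t.min?.elim x (min x) := by
  induction t generalizing x with
  | nil => rfl
  | cons y ys ih =>
      rw [List.foldl_cons, ih, List.min?_cons]
      cases h : ys.min? with
      | none => simp
      | some m => simp [min_assoc]

theorem pvFoldl_minStep_min? (l : List Int) :
    l.foldl pvMinStep none = l.min? := by
  cases l with
  | nil => rfl
  | cons x t =>
      have h1 : pvMinStep none x = some x := by simp [pvMinStep]
      rw [List.foldl_cons, h1, pvFoldl_minStep_some, pvFoldl_min_elim, List.min?_cons]

-- an optional-update fold is a fold over the filterMap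
theorem pvFoldl_match_filterMap {α : Type} (g : α → Option Int) (l : List α) (b0 : Option Int) :
    l.foldl (fun b a => match g a with | some r => pvMinStep b r | none => b) b0
      = (l.filterMap g).foldl pvMinStep b0 := by
  induction l generalizing b0 with
  | nil => rfl
  | cons x t ih =>
      simp only [List.foldl_cons, List.filterMap_cons]
      cases h : g x with
      | none => simpa [h] using ih b0
      | some r => simpa [h] using ih (pvMinStep b0 r)

theorem pvFoldl_flat {α : Type} (h : α → List Int) (l : List α) (b0 : Option Int) :
    l.foldl (fun b a => (h a).foldl pvMinStep b) b0 = (l.flatMap h).foldl pvMinStep b0 := by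
  induction l generalizing b0 with
  | nil => rfl
  | cons x t ih => simp only [List.foldl_cons, List.flatMap_cons, List.foldl_append, ih]

-- assoc-list lookup characterisation (keys of pvPairs are distinct)
theorem pvFind_assoc (pairs : List (String × Int)) (hnd : (pairs.map Prod.fst).Nodup)
    (s : String) (r : Int) :
    (pairs.find? (fun p => p.1 == s)).map Prod.snd = some r ↔ (s, r) ∈ pairs := by
  induction pairs with
  | nil => simp
  | cons p t ih =>
      obtain ⟨k, v⟩ := p
      simp only [List.map_cons, List.nodup_cons] at hnd
      by_cases hk : k = s
      · subst hk
        rw [List.find?_cons_of_pos (by simp)]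
        simp only [Option.map_some, Option.some_inj, List.mem_cons, Prod.mk.injEq, true_and]
        constructor
        · rintro rfl; exact Or.inl rfl
        · rintro (h | hm)
          · exact h.symm
          · exact absurd (List.mem_map_of_mem (f := Prod.fst) hm) hnd.1
      · rw [List.find?_cons_of_neg (by simpa using hk)]
        rw [ih hnd.2]
        simp only [List.mem_cons, Prod.mk.injEq]
        constructor
        · exact Or.inr
        · rintro (⟨rfl, rfl⟩ | hm)
          · exact absurd rfl hk
          · exact hm

theorem pvKeywords_get_iff (s : String) (r : Int) :
    pvKeywords.get? s = some r ↔ (s, r) ∈ pvPairs := by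
  have hitems : pvKeywords.items = pvPairs := by decide
  have hnd : (pvPairs.map Prod.fst).Nodup := by decide
  rw [show pvKeywords.get? s = (pvKeywords.items.find? (fun p => p.1 == s)).map Prod.snd from rfl,
      hitems]
  exact pvFind_assoc pvPairs hnd s r

-- the flattened candidate list of B's scan
def pvCands (name : String) : List Int :=
  (PySem.List.pyRange 0 (PySem.Str.len name) 1).flatMap
    (fun i => pvLengths.filterMap
      (fun length => pvKeywords.get? (PySem.Str.slice name (some i) (some (i + length)))))

-- facts about the literal tables
theorem pvPairs_shape : ∀ p ∈ pvPairs,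
    ((p.1.toList.length : Int) ∈ pvLengths ∧ p.1.toList ≠ [] ∧
      (p.2 = 0 ∨ p.2 = 1 ∨ p.2 = 2 ∨ p.2 = 3)) := by decide

-- r is a candidate iff some keyword of rank r occurs in name
theorem pvMem_cands (name : String) (r : Int) :
    r ∈ pvCands name ↔ ∃ w, (w, r) ∈ pvPairs ∧ PySem.Str.isIn w name = true := by
  simp only [pvCands, List.mem_flatMap, List.mem_filterMap]
  constructor
  · rintro ⟨i, hi, L, hL, hget⟩
    rw [PySem.List.mem_pyRange_one] at hi
    obtain ⟨j, rfl⟩ : ∃ j : Nat, i = (j : Int) := ⟨i.toNat, (Int.toNat_of_nonneg hi.1).symm⟩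
    have hL0 : (0:Int) ≤ L := by
      have : L ∈ pvLengths := hL
      fin_cases this <;> norm_num
    obtain ⟨n, rfl⟩ : ∃ n : Nat, L = (n : Int) := ⟨L.toNat, (Int.toNat_of_nonneg hL0).symm⟩
    refine ⟨PySem.Str.slice name (some (j:Int)) (some ((j:Int) + (n:Int))),
      (pvKeywords_get_iff _ _).mp hget, ?_⟩
    rw [show PySem.Str.isIn = fun sub s => PySem.Chars.isIn sub.toList s.toList from rfl]
    simp only [PySem.Str.toList_slice, PySem.Chars.slice_eq_listSlice,
      PySem.List.slice_natCast_add]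
    rw [← PySem.Chars.exists_prefix_drop_iff_isIn]
    exact ⟨j, List.take_prefix _ _⟩
  · rintro ⟨w, hw, hin⟩
    have hshape := pvPairs_shape _ hw
    rw [show PySem.Str.isIn w name = PySem.Chars.isIn w.toList name.toList from rfl,
      ← PySem.Chars.exists_prefix_drop_iff_isIn] at hin
    obtain ⟨j, hpre⟩ := hin
    have hjlt : j < name.toList.length := by
      by_contra hge
      rw [List.drop_eq_nil_of_le (by omega)] at hpre
      exact hshape.2.1 (List.prefix_nil.mp hpre)
    refine ⟨(j : Int), ?_, (w.toList.length : Int), hshape.1, ?_⟩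
    · rw [PySem.List.mem_pyRange_one, PySem.Str.len_eq]
      constructor
      · positivity
      · exact_mod_cast hjlt
    · rw [pvKeywords_get_iff]
      have hslice : PySem.Str.slice name (some (j:Int)) (some ((j:Int) + (w.toList.length:Int))) = w := by
        have : (PySem.Str.slice name (some (j:Int)) (some ((j:Int) + (w.toList.length:Int)))).toList = w.toList := by
          simp only [PySem.Str.toList_slice, PySem.Chars.slice_eq_listSlice,
            PySem.List.slice_natCast_add]
          exact (List.prefix_iff_eq_take.mp hpre).symm
        calc PySem.Str.slice name (some (j:Int)) (some ((j:Int) + (w.toList.length:Int)))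
            = String.ofList (PySem.Str.slice name (some (j:Int)) (some ((j:Int) + (w.toList.length:Int)))).toList := String.ofList_toList.symm
          _ = String.ofList w.toList := by rw [this]
          _ = w := String.ofList_toList
      rw [hslice]; exact hw

-- B's nested loop computes the minimum of the flattened candidate list
theorem pvBest_eq (name : String) :
    (PySem.List.pyRange 0 (PySem.Str.len name) 1).foldl
      (fun best i => pvLengths.foldl
        (fun best length =>
          match pvKeywords.get? (PySem.Str.slice name (some i) (some (i + length))) with
          | some rank => if best.elim true (fun b => rank < b) then some rank else best
          | none => best) best) none
    = (pvCands name).min? := by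
  rw [← pvFoldl_minStep_min?]
  unfold pvCands
  rw [← pvFoldl_flat]
  have hinner : ∀ (b : Option Int) (i : Int),
      pvLengths.foldl
        (fun best length =>
          match pvKeywords.get? (PySem.Str.slice name (some i) (some (i + length))) with
          | some rank => if best.elim true (fun b => rank < b) then some rank else best
          | none => best) b
      = (pvLengths.filterMap
          (fun length => pvKeywords.get? (PySem.Str.slice name (some i) (some (i + length))))).foldl
          pvMinStep b := by
    intro b i
    exact pvFoldl_match_filterMap
      (fun length => pvKeywords.get? (PySem.Str.slice name (some i) (some (i + length)))) pvLengths b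
  simp only [hinner]

-- the four keyword groups of A, and A's any()-tests
def pvG0 : List String := ["carrot", "beet", "radish", "turnip", "potato", "onion"]
def pvG1 : List String := ["lettuce", "spinach", "kale", "chard", "cabbage", "herb"]
def pvG2 : List String := ["broccoli", "cauliflower", "flower", "artichoke"]
def pvG3 : List String := ["tomato", "pepper", "cucumber", "squash", "bean", "pea"]

theorem pvMem_pairs_iff (w : String) (r : Int) :
    (w, r) ∈ pvPairs ↔
      (r = 0 ∧ w ∈ pvG0) ∨ (r = 1 ∧ w ∈ pvG1) ∨ (r = 2 ∧ w ∈ pvG2) ∨ (r = 3 ∧ w ∈ pvG3) := by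
  show (w, r) ∈ (pvG0.map (fun w => (w, (0:Int))) ++ pvG1.map (fun w => (w, (1:Int)))
      ++ pvG2.map (fun w => (w, (2:Int))) ++ pvG3.map (fun w => (w, (3:Int)))) ↔ _
  simp only [List.mem_append, List.mem_map, Prod.mk.injEq]
  constructor
  · rintro (((⟨a, ha, rfl, rfl⟩ | ⟨a, ha, rfl, rfl⟩) | ⟨a, ha, rfl, rfl⟩) | ⟨a, ha, rfl, rfl⟩)
    · exact Or.inl ⟨rfl, ha⟩
    · exact Or.inr (Or.inl ⟨rfl, ha⟩)
    · exact Or.inr (Or.inr (Or.inl ⟨rfl, ha⟩))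
    · exact Or.inr (Or.inr (Or.inr ⟨rfl, ha⟩))
  · rintro (⟨rfl, hw⟩ | ⟨rfl, hw⟩ | ⟨rfl, hw⟩ | ⟨rfl, hw⟩)
    · exact Or.inl (Or.inl (Or.inl ⟨w, hw, rfl, rfl⟩))
    · exact Or.inl (Or.inl (Or.inr ⟨w, hw, rfl, rfl⟩))
    · exact Or.inl (Or.inr ⟨w, hw, rfl, rfl⟩)
    · exact Or.inr ⟨w, hw, rfl, rfl⟩

theorem pvMem_cands_iff (name : String) (r : Int) :
    r ∈ pvCands name ↔
      (r = 0 ∧ pvG0.any (fun w => PySem.Str.isIn w name) = true) ∨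
      (r = 1 ∧ pvG1.any (fun w => PySem.Str.isIn w name) = true) ∨
      (r = 2 ∧ pvG2.any (fun w => PySem.Str.isIn w name) = true) ∨
      (r = 3 ∧ pvG3.any (fun w => PySem.Str.isIn w name) = true) := by
  rw [pvMem_cands]
  simp only [List.any_eq_true]
  constructor
  · rintro ⟨w, hw, hin⟩
    rcases (pvMem_pairs_iff w r).mp hw with ⟨rfl, hg⟩ | ⟨rfl, hg⟩ | ⟨rfl, hg⟩ | ⟨rfl, hg⟩
    · exact Or.inl ⟨rfl, w, hg, hin⟩
    · exact Or.inr (Or.inl ⟨rfl, w, hg, hin⟩)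
    · exact Or.inr (Or.inr (Or.inl ⟨rfl, w, hg, hin⟩))
    · exact Or.inr (Or.inr (Or.inr ⟨rfl, w, hg, hin⟩))
  · rintro (⟨rfl, w, hg, hin⟩ | ⟨rfl, w, hg, hin⟩ | ⟨rfl, w, hg, hin⟩ | ⟨rfl, w, hg, hin⟩)
    · exact ⟨w, (pvMem_pairs_iff w 0).mpr (Or.inl ⟨rfl, hg⟩), hin⟩
    · exact ⟨w, (pvMem_pairs_iff w 1).mpr (Or.inr (Or.inl ⟨rfl, hg⟩)), hin⟩
    · exact ⟨w, (pvMem_pairs_iff w 2).mpr (Or.inr (Or.inr (Or.inl ⟨rfl, hg⟩))), hin⟩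
    · exact ⟨w, (pvMem_pairs_iff w 3).mpr (Or.inr (Or.inr (Or.inr ⟨rfl, hg⟩))), hin⟩

theorem pvMin_some (name : String) (k : Int)
    (hmem : k ∈ pvCands name) (hbd : ∀ b ∈ pvCands name, k ≤ b) :
    (pvCands name).min? = some k :=
  List.min?_eq_some_iff.mpr ⟨hmem, hbd⟩

-- per-name equality of the two computations
theorem pvMain (name : String) :
    (if pvG0.any (fun word => PySem.Str.isIn word name) then "root_day"
     else if pvG1.any (fun word => PySem.Str.isIn word name) then "leaf_day"
     else if pvG2.any (fun word => PySem.Str.isIn word name) then "flower_day"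
     else if pvG3.any (fun word => PySem.Str.isIn word name) then "fruit_day"
     else "leaf_day")
    = (match (pvCands name).min? with
       | none => "leaf_day"
       | some r => (PySem.List.pyGet? pvCategories r).getD "leaf_day") := by
  by_cases h0 : pvG0.any (fun word => PySem.Str.isIn word name) = true
  · have hmin : (pvCands name).min? = some 0 := by
      refine pvMin_some name 0 ((pvMem_cands_iff name 0).mpr (Or.inl ⟨rfl, h0⟩)) ?_
      intro b hb
      rcases (pvMem_cands_iff name b).mp hb with ⟨rfl, _⟩ | ⟨rfl, _⟩ | ⟨rfl, _⟩ | ⟨rfl, _⟩ <;> norm_num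
    rw [hmin, if_pos h0]
    rfl
  · by_cases h1 : pvG1.any (fun word => PySem.Str.isIn word name) = true
    · have hmin : (pvCands name).min? = some 1 := by
        refine pvMin_some name 1 ((pvMem_cands_iff name 1).mpr (Or.inr (Or.inl ⟨rfl, h1⟩))) ?_
        intro b hb
        rcases (pvMem_cands_iff name b).mp hb with ⟨rfl, hg⟩ | ⟨rfl, _⟩ | ⟨rfl, _⟩ | ⟨rfl, _⟩
        · exact absurd hg h0
        all_goals norm_num
      rw [hmin, if_neg h0, if_pos h1]
      rfl
    · by_cases h2 : pvG2.any (fun word => PySem.Str.isIn word name) = true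
      · have hmin : (pvCands name).min? = some 2 := by
          refine pvMin_some name 2
            ((pvMem_cands_iff name 2).mpr (Or.inr (Or.inr (Or.inl ⟨rfl, h2⟩)))) ?_
          intro b hb
          rcases (pvMem_cands_iff name b).mp hb with ⟨rfl, hg⟩ | ⟨rfl, hg⟩ | ⟨rfl, _⟩ | ⟨rfl, _⟩
          · exact absurd hg h0
          · exact absurd hg h1
          all_goals norm_num
        rw [hmin, if_neg h0, if_neg h1, if_pos h2]
        rfl
      · by_cases h3 : pvG3.any (fun word => PySem.Str.isIn word name) = true
        · have hmin : (pvCands name).min? = some 3 := by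
            refine pvMin_some name 3
              ((pvMem_cands_iff name 3).mpr (Or.inr (Or.inr (Or.inr ⟨rfl, h3⟩)))) ?_
            intro b hb
            rcases (pvMem_cands_iff name b).mp hb with ⟨rfl, hg⟩ | ⟨rfl, hg⟩ | ⟨rfl, hg⟩ | ⟨rfl, _⟩
            · exact absurd hg h0
            · exact absurd hg h1
            · exact absurd hg h2
            · norm_num
          rw [hmin, if_neg h0, if_neg h1, if_neg h2, if_pos h3]
          rfl
        · have hmin : (pvCands name).min? = none := by
            rw [List.min?_eq_none_iff]
            refine List.eq_nil_iff_forall_not_mem.mpr ?_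
            intro r hr
            rcases (pvMem_cands_iff name r).mp hr with ⟨_, hg⟩ | ⟨_, hg⟩ | ⟨_, hg⟩ | ⟨_, hg⟩
            · exact h0 hg
            · exact h1 hg
            · exact h2 hg
            · exact h3 hg
          rw [hmin, if_neg h0, if_neg h1, if_neg h2, if_neg h3]

-- ===== VERDICT (by name: the statement is the Claim_ definition above) =====
theorem get_biodynamic_category_spec : Claim_equal_get_biodynamic_category := by
  intro attributes _
  show get_biodynamic_category attributes = get_biodynamic_category_alt attributes
  simp only [get_biodynamic_category, get_biodynamic_category_alt]
  rw [pvBest_eq]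
  exact pvMain (PySem.Str.lower ((PySem.Dict.mk attributes).getD "name" ""))
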